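-- pv_equiv track=rewrite | github.com/vsuminv/Algorithm | 프로그래머스/0/120815. 피자 나눠 먹기 （2）/피자 나눠 먹기 （2）.py | solution
-- ===== SOURCE A (Python) =====
-- def solution(n):
--     answer = 0
--     max_num = n
--     pizza_num = 6
--     if n % 6 == 0:
--         answer = n // 6
--     else:
--         while pizza_num != 0:
--                 max_num , pizza_num = pizza_num, max_num % pizza_num
--
--         answer = n // max_num
--
--
--     return answer
-- ===== SOURCE B (Python) =====
-- def solution(n):
--     # answer = n // gcd(n, 6): scan the divisors of 6 in decreasing order
--     for d in (6, 3, 2):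
--         if n % d == 0:
--             return n // d
--     return n  # gcd is 1
-- ===== Notes on version B (the rewrite author's own statement) =====
-- stated objective: simpler
-- what changed: Replaces the branch-plus-Euclid gcd loop by a direct scan over the divisors of six in decreasing order, returning n floor-divided by the first divisor that divides n, else n itself.
import Mathlib
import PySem

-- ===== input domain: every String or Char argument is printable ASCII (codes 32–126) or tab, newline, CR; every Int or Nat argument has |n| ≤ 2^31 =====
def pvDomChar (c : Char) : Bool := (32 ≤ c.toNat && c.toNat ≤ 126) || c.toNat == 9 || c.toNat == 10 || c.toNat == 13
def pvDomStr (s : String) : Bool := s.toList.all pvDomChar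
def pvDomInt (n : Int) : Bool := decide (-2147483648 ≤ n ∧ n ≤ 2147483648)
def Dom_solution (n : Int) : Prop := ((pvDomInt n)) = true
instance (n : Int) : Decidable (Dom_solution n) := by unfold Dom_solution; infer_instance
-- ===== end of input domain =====

-- B replaces A's 'n % 6' branch plus hand-written Euclid gcd loop by a direct scan
-- over the divisors of 6 in decreasing order; objective: simpler.

-- ===== PORT A =====
-- the 'while pizza_num != 0' Euclid loop on state (max_num, pizza_num)
def pvEuclid (maxNum pizza : Int) : Int :=
  if h : pizza = 0 then maxNum
  else pvEuclid pizza (PySem.Int.mod maxNum pizza)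
termination_by pizza.natAbs
decreasing_by
  rcases lt_or_gt_of_ne h with hneg | hpos
  · have := PySem.Int.mod_neg_bounds maxNum hneg
    omega
  · have h1 := PySem.Int.mod_nonneg maxNum hpos
    have h2 := PySem.Int.mod_lt maxNum hpos
    omega

def solution (n : Int) : Int :=
  if PySem.Int.mod n 6 = 0 then
    PySem.Int.floordiv n 6
  else
    PySem.Int.floordiv n (pvEuclid n 6)

-- ===== PORT B =====
def solution_alt (n : Int) : Int :=
  if PySem.Int.mod n 6 = 0 then PySem.Int.floordiv n 6
  else if PySem.Int.mod n 3 = 0 then PySem.Int.floordiv n 3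
  else if PySem.Int.mod n 2 = 0 then PySem.Int.floordiv n 2
  else n

-- ===== PRECONDITION & SPEC =====
def Spec_solution (n : Int) (out : Int) : Prop := out = solution_alt n
instance (n : Int) (out : Int) : Decidable (Spec_solution n out) := by unfold Spec_solution; infer_instance

-- ===== CLAIM (what is proved, stated in full; the proofs are below) =====
def Claim_equal_solution : Prop := ∀ (n : Int), Dom_solution n → Spec_solution n (solution n)

-- ===== LEMMAS AND PROOFS =====
theorem pvEuclid_step (m p : Int) (h : p ≠ 0) :
    pvEuclid m p = pvEuclid p (PySem.Int.mod m p) := by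
  rw [pvEuclid]; simp [h]

theorem pvEuclid_zero (m : Int) : pvEuclid m 0 = m := by
  rw [pvEuclid]; simp

theorem pvMod_lit (a b c : Int) (hb : 0 < b) (hc : a % b = c) : PySem.Int.mod a b = c := by
  rw [PySem.Int.mod_eq_emod_of_pos hb]; exact hc

theorem pvE61 : pvEuclid 6 1 = 1 := by
  rw [pvEuclid_step 6 1 (by norm_num), pvMod_lit 6 1 0 (by norm_num) (by decide), pvEuclid_zero]
theorem pvE62 : pvEuclid 6 2 = 2 := by
  rw [pvEuclid_step 6 2 (by norm_num), pvMod_lit 6 2 0 (by norm_num) (by decide), pvEuclid_zero]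
theorem pvE63 : pvEuclid 6 3 = 3 := by
  rw [pvEuclid_step 6 3 (by norm_num), pvMod_lit 6 3 0 (by norm_num) (by decide), pvEuclid_zero]
theorem pvE64 : pvEuclid 6 4 = 2 := by
  rw [pvEuclid_step 6 4 (by norm_num), pvMod_lit 6 4 2 (by norm_num) (by decide),
      pvEuclid_step 4 2 (by norm_num), pvMod_lit 4 2 0 (by norm_num) (by decide), pvEuclid_zero]
theorem pvE65 : pvEuclid 6 5 = 1 := by
  rw [pvEuclid_step 6 5 (by norm_num), pvMod_lit 6 5 1 (by norm_num) (by decide),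
      pvEuclid_step 5 1 (by norm_num), pvMod_lit 5 1 0 (by norm_num) (by decide), pvEuclid_zero]

-- ===== VERDICT (by name: the statement is the Claim_ definition above) =====
theorem solution_spec : Claim_equal_solution := by
  intro n _
  show solution n = solution_alt n
  unfold solution solution_alt
  rw [PySem.Int.mod_eq_emod_of_pos (b := 6) (by norm_num),
      PySem.Int.mod_eq_emod_of_pos (b := 3) (by norm_num),
      PySem.Int.mod_eq_emod_of_pos (b := 2) (by norm_num)]
  by_cases hz : n % 6 = 0
  · simp [hz]
  · simp only [hz, if_false]
    have hb1 : (0:Int) ≤ n % 6 := Int.emod_nonneg n (by norm_num)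
    have hb2 : n % 6 < 6 := Int.emod_lt_of_pos n (by norm_num)
    have he : pvEuclid n 6 = pvEuclid 6 (n % 6) := by
      rw [pvEuclid_step n 6 (by norm_num), PySem.Int.mod_eq_emod_of_pos (by norm_num)]
    have hcases : n % 6 = 1 ∨ n % 6 = 2 ∨ n % 6 = 3 ∨ n % 6 = 4 ∨ n % 6 = 5 := by omega
    rcases hcases with hr | hr | hr | hr | hr <;> rw [hr] at he <;>
      rw [he] <;>
      simp only [pvE61, pvE62, pvE63, pvE64, pvE65] <;>
      rw [PySem.Int.floordiv_eq_ediv_of_pos (by norm_num)] <;>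
      (try rw [PySem.Int.floordiv_eq_ediv_of_pos (by norm_num)]) <;>
      (try rw [PySem.Int.floordiv_eq_ediv_of_pos (by norm_num)]) <;>
      split_ifs <;> omega
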